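-- pv_equiv track=rewrite | github.com/tennythomast/takeoff_tool | backend/context_manager/utils.py | clean_content_for_summary
-- ===== SOURCE A (Python) =====
-- def clean_content_for_summary(content: str) -> str:
--     """
--     Clean and prepare content for summarization
--
--     Removes noise and formatting that doesn't add value to summaries
--     """
--     if not content:
--         return ""
--
--     # Remove excessive whitespace
--     cleaned = ' '.join(content.split())
--
--     # Remove very short lines that are likely noise
--     lines = cleaned.split('\n')
--     meaningful_lines = [line.strip() for line in lines if len(line.strip()) > 5]
--
--     if meaningful_lines:
--         return '\n'.join(meaningful_lines)
--     else:
--         return cleaned  # Return original if no meaningful lines found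
-- ===== SOURCE B (Python) =====
-- def clean_content_for_summary(content: str) -> str:
--     # After whitespace normalization no newlines remain, so the original's
--     # line-filtering pass can never change the result: one split/join suffices.
--     return ' '.join(content.split())
-- ===== Notes on version B (the rewrite author's own statement) =====
-- stated objective: simpler
-- what changed: B drops the original's second pass (splitting the cleaned text into lines, stripping them and filtering by length > 5) entirely: after whitespace normalization no newline remains, so that filter is provably a no-op and B is a single split/join expression, with the empty-string guard subsumed as well.
import Mathlib
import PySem

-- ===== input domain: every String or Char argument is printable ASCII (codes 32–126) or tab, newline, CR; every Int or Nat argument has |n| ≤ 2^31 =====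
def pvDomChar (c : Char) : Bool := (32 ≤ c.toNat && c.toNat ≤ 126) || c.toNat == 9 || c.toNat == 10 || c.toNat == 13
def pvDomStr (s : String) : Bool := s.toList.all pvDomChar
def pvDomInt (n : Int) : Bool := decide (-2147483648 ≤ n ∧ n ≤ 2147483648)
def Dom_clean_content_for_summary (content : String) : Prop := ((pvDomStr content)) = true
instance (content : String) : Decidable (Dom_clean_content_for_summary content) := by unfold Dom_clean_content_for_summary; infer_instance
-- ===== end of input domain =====

-- B removes the second split('\n')/strip/len>5 pass: after whitespace normalization no
-- newline remains, so the line filter is a no-op and one split/join expression suffices.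


-- ===== PORT A =====
def clean_content_for_summary (content : String) : String :=
  if content = "" then ""
  else
    let cleaned := PySem.Str.join " " (PySem.Str.split₀ content)
    -- cleaned.split('\n'): the Chars form of split is used on .toList (no Str wrapper exists)
    let lines := (PySem.Chars.splitOn cleaned.toList ['\n']).map String.ofList
    let meaningful := lines.filterMap (fun line =>
      let t := PySem.Str.strip line
      if 5 < PySem.Str.len t then some t else none)
    if meaningful.isEmpty then cleaned else PySem.Str.join "\n" meaningful

-- ===== PORT B =====
def clean_content_for_summary_alt (content : String) : String :=
  PySem.Str.join " " (PySem.Str.split₀ content)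

-- ===== PRECONDITION & SPEC =====
def Spec_clean_content_for_summary (content : String) (out : String) : Prop := out = clean_content_for_summary_alt content
instance (content : String) (out : String) : Decidable (Spec_clean_content_for_summary content out) := by unfold Spec_clean_content_for_summary; infer_instance

-- ===== CLAIM (what is proved, stated in full; the proofs are below) =====
def Claim_equal_clean_content_for_summary : Prop := ∀ (content : String), Dom_clean_content_for_summary content → Spec_clean_content_for_summary content (clean_content_for_summary content)

-- ===== LEMMAS AND PROOFS =====

-- every word produced by split₀ is nonempty and contains no whitespace character
theorem split₀_go_good (s : List Char) : ∀ (cur : List Char) (acc : List (List Char)),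
    (∀ c ∈ cur, PySem.Chars.isspace c = false) →
    (∀ w ∈ acc, w ≠ [] ∧ ∀ c ∈ w, PySem.Chars.isspace c = false) →
    ∀ w ∈ PySem.Chars.split₀.go s cur acc, w ≠ [] ∧ ∀ c ∈ w, PySem.Chars.isspace c = false := by
  induction s with
  | nil =>
    intro cur acc hcur hacc w hw
    rw [PySem.Chars.split₀.go] at hw
    by_cases hc : cur.isEmpty
    · simp only [hc, if_true, List.mem_reverse] at hw; exact hacc w hw
    · simp only [hc, Bool.false_eq_true, if_false, List.mem_reverse, List.mem_cons] at hw
      rcases hw with hw | hw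
      · subst hw
        refine ⟨by simpa [List.isEmpty_iff] using hc, ?_⟩
        intro c hc'; exact hcur c (by simpa using hc')
      · exact hacc w hw
  | cons c rest ih =>
    intro cur acc hcur hacc w hw
    rw [PySem.Chars.split₀.go] at hw
    by_cases hsp : PySem.Chars.isspace c
    · by_cases hc : cur.isEmpty
      · simp only [hsp, hc, if_true] at hw
        exact ih [] acc (by simp) hacc w hw
      · simp only [hsp, hc, Bool.false_eq_true, if_true, if_false] at hw
        refine ih [] (cur.reverse :: acc) (by simp) ?_ w hw
        intro v hv
        rcases List.mem_cons.mp hv with hv | hv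
        · subst hv
          exact ⟨by simpa [List.isEmpty_iff] using hc, fun d hd => hcur d (by simpa using hd)⟩
        · exact hacc v hv
    · simp only [hsp, Bool.false_eq_true, if_false] at hw
      refine ih (c :: cur) acc ?_ hacc w hw
      intro d hd
      rcases List.mem_cons.mp hd with h | h
      · subst h; simpa using hsp
      · exact hcur d h

theorem split₀_good (l : List Char) :
    ∀ w ∈ PySem.Chars.split₀ l, w ≠ [] ∧ ∀ c ∈ w, PySem.Chars.isspace c = false :=
  split₀_go_good l [] [] (by simp) (by simp)

-- membership in a space-joined list
theorem mem_join_space (ws : List (List Char)) (c : Char) :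
    c ∈ PySem.Chars.join [' '] ws → c = ' ' ∨ ∃ w ∈ ws, c ∈ w := by
  induction ws with
  | nil => simp [PySem.Chars.join_nil]
  | cons w rest ih =>
    cases rest with
    | nil => intro h; right; exact ⟨w, by simp, by simpa [PySem.Chars.join_singleton] using h⟩
    | cons w2 rest2 =>
      intro h
      rw [PySem.Chars.join_cons_cons] at h
      simp only [List.mem_append, List.mem_singleton] at h
      rcases h with (h | h) | h
      · right; exact ⟨w, by simp, h⟩
      · left; simpa using h
      · rcases ih h with h | ⟨v, hv, hc⟩
        · left; exact h
        · right; exact ⟨v, List.mem_cons_of_mem _ hv, hc⟩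

-- a space-joined list of nonempty words is nonempty
theorem join_space_ne_nil (w : List Char) (rest : List (List Char)) (hw : w ≠ []) :
    PySem.Chars.join [' '] (w :: rest) ≠ [] := by
  cases rest with
  | nil => simpa [PySem.Chars.join_singleton] using hw
  | cons w2 rest2 => rw [PySem.Chars.join_cons_cons]; simp [hw]

theorem head?_join_space (w : List Char) (rest : List (List Char)) (hw : w ≠ []) :
    (PySem.Chars.join [' '] (w :: rest)).head? = w.head? := by
  cases rest with
  | nil => rw [PySem.Chars.join_singleton]
  | cons w2 rest2 =>
    rw [PySem.Chars.join_cons_cons, List.append_assoc]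
    exact List.head?_append_of_ne_nil _ hw

theorem getLast?_join_space (ws : List (List Char)) (hne : ∀ w ∈ ws, w ≠ []) (c : Char)
    (h : (PySem.Chars.join [' '] ws).getLast? = some c) : ∃ w ∈ ws, w.getLast? = some c := by
  induction ws with
  | nil => simp [PySem.Chars.join_nil] at h
  | cons w rest ih =>
    cases rest with
    | nil => exact ⟨w, by simp, by simpa [PySem.Chars.join_singleton] using h⟩
    | cons w2 rest2 =>
      rw [PySem.Chars.join_cons_cons,
        List.getLast?_append_of_ne_nil _ (join_space_ne_nil w2 rest2 (hne w2 (by simp)))] at h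
      rcases ih (fun v hv => hne v (List.mem_cons_of_mem _ hv)) h with ⟨v, hv, hc⟩
      exact ⟨v, List.mem_cons_of_mem _ hv, hc⟩

-- strip is the identity on a string whose first and last characters are not whitespace
theorem strip_eq_self (l : List Char)
    (h1 : ∀ c, l.head? = some c → PySem.Chars.isspace c = false)
    (h2 : ∀ c, l.getLast? = some c → PySem.Chars.isspace c = false) :
    PySem.Chars.strip l = l := by
  have hl : PySem.Chars.lstrip l = l := by
    cases l with
    | nil => rfl
    | cons c t =>
      unfold PySem.Chars.lstrip
      exact List.dropWhile_cons_of_neg (by simp [h1 c rfl])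
  have hr : PySem.Chars.rstrip l = l := by
    unfold PySem.Chars.rstrip
    cases hrev : l.reverse with
    | nil => simpa using congrArg List.reverse hrev
    | cons c t =>
      have hc : l.getLast? = some c := by
        rw [← List.head?_reverse, hrev]; rfl
      rw [List.dropWhile_cons_of_neg (by simp [h2 c hc]), ← hrev, List.reverse_reverse]
  unfold PySem.Chars.strip
  rw [hl, hr]

-- splitting on a separator that does not occur returns the whole string
theorem splitOn_go_no_occ (fuel : Nat) : ∀ (s cur : List Char) (acc : List (List Char)),
    '\n' ∉ s →
    PySem.Chars.splitOn.go ['\n'] fuel s cur acc = ((cur.reverse ++ s) :: acc).reverse := by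
  induction fuel with
  | zero => intro s cur acc _; rw [PySem.Chars.splitOn.go]
  | succ fuel ih =>
    intro s cur acc hs
    cases s with
    | nil => rw [PySem.Chars.splitOn.go] <;> simp
    | cons c rest =>
      have hc : c ≠ '\n' := fun h => hs (by simp [h])
      rw [PySem.Chars.splitOn.go]
      have hpre : List.isPrefixOf ['\n'] (c :: rest) = false := by
        simp [List.isPrefixOf]; exact fun h => absurd h.symm hc
      rw [hpre]
      simp only [Bool.false_eq_true, if_false]
      rw [ih rest (c :: cur) acc (fun h => hs (by simp [h]))]
      simp

theorem splitOn_no_newline (s : List Char) (hs : '\n' ∉ s) :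
    PySem.Chars.splitOn s ['\n'] = [s] := by
  unfold PySem.Chars.splitOn
  rw [splitOn_go_no_occ _ s [] [] hs]
  simp

-- the normalized text contains no newline
theorem cleaned_no_newline (l : List Char) : '\n' ∉ PySem.Chars.join [' '] (PySem.Chars.split₀ l) := by
  intro h
  rcases mem_join_space _ _ h with h | ⟨w, hw, hc⟩
  · exact absurd h (by decide)
  · have := (split₀_good l w hw).2 '\n' hc
    simp [PySem.Chars.isspace] at this

-- strip is the identity on the normalized text
theorem cleaned_strip_self (l : List Char) :
    PySem.Chars.strip (PySem.Chars.join [' '] (PySem.Chars.split₀ l)) =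
      PySem.Chars.join [' '] (PySem.Chars.split₀ l) := by
  apply strip_eq_self
  · intro c hc
    cases hws : PySem.Chars.split₀ l with
    | nil => rw [hws] at hc; simp [PySem.Chars.join_nil] at hc
    | cons w rest =>
      rw [hws, head?_join_space w rest ((split₀_good l w (by simp [hws])).1)] at hc
      exact (split₀_good l w (by simp [hws])).2 c (List.mem_of_mem_head? hc)
  · intro c hc
    rcases getLast?_join_space _ (fun w hw => (split₀_good l w hw).1) c hc with ⟨w, hw, hc'⟩
    exact (split₀_good l w hw).2 c (List.mem_of_mem_getLast? hc')

-- the normalized text, as an ofList of the Chars-level computation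
theorem cleaned_eq_ofList (content : String) :
    PySem.Str.join " " (PySem.Str.split₀ content) =
      String.ofList (PySem.Chars.join [' '] (PySem.Chars.split₀ content.toList)) := by
  unfold PySem.Str.join PySem.Str.split₀
  simp [List.map_map, Function.comp_def]

-- ===== VERDICT (by name: the statement is the Claim_ definition above) =====
theorem clean_content_for_summary_spec : Claim_equal_clean_content_for_summary := by
  intro content _
  unfold Spec_clean_content_for_summary clean_content_for_summary clean_content_for_summary_alt
  by_cases h0 : content = ""
  · subst h0; decide
  · rw [if_neg h0]
    simp only [cleaned_eq_ofList content, String.toList_ofList,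
      splitOn_no_newline _ (cleaned_no_newline content.toList),
      List.map_cons, List.map_nil, List.filterMap_cons, List.filterMap_nil]
    have hstrip : PySem.Str.strip (String.ofList (PySem.Chars.join [' '] (PySem.Chars.split₀ content.toList)))
        = String.ofList (PySem.Chars.join [' '] (PySem.Chars.split₀ content.toList)) := by
      unfold PySem.Str.strip
      rw [String.toList_ofList, cleaned_strip_self]
    rw [hstrip]
    simp only [PySem.Str.len_eq, String.toList_ofList]
    split_ifs with h5 hA hB
    · simp at hA
    · unfold PySem.Str.join
      rw [List.map_cons, List.map_nil, String.toList_ofList, PySem.Chars.join_singleton, String.toList_ofList]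
    · rfl
    · simp at hB
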